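-- pv_equiv track=rewrite | github.com/ThiagoVila11/portaria | integrations/visitor.py | best_match_by_name
-- ===== SOURCE A (Python) =====
-- from typing import List, Dict, Optional
--
-- def best_match_by_name(candidates: List[Dict], name: str) -> Optional[Dict]:
--     if not candidates:
--         return None
--     name_low = name.strip().lower()
--     exact = [c for c in candidates if (c.get("Name") or "").strip().lower() == name_low]
--     if exact:
--         return exact[0]
--     starts = [c for c in candidates if (c.get("Name") or "").strip().lower().startswith(name_low)]
--     if starts:
--         return starts[0]
--     contains = [c for c in candidates if name_low in (c.get("Name") or "").strip().lower()]
--     if contains: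
--         return contains[0]
--     return None
-- ===== SOURCE B (Python) =====
-- from typing import List, Dict, Optional
--
-- def best_match_by_name(candidates: List[Dict], name: str) -> Optional[Dict]:
--     if not candidates:
--         return None
--     name_low = name.strip().lower()
--     first_starts = None
--     first_contains = None
--     for c in candidates:
--         n = (c.get("Name") or "").strip().lower()
--         if n == name_low:
--             return c
--         elif n.startswith(name_low) and first_starts is None:
--             first_starts = c
--         elif name_low in n and first_contains is None:
--             first_contains = c
--     if first_starts is not None:
--         return first_starts
--     return first_contains
-- ===== Notes on version B (the rewrite author's own statement) =====
-- stated objective: simpler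
-- what changed: Replaced A's three full filter passes (exact, startswith, contains) each building a list by a single loop that returns immediately on an exact match and remembers the first startswith and first substring candidate.
import Mathlib
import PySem

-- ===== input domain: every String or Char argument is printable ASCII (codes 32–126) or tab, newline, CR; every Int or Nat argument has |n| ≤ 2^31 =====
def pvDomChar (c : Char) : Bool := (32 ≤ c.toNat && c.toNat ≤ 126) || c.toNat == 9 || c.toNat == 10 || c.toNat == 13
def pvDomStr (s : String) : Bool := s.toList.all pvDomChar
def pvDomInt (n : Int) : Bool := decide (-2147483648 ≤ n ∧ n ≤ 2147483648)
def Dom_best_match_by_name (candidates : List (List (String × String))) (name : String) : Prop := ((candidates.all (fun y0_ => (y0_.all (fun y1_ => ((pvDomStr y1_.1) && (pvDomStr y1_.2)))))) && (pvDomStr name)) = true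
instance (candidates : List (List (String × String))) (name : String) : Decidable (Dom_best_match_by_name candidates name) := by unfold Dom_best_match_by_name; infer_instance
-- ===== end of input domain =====

-- B replaces A's three full filter passes by one loop that early-returns on an exact
-- match and remembers the first startswith / first substring candidate (objective: simpler, one pass).

-- ===== PORT A =====
-- (c.get("Name") or "").strip().lower(): first-match assoc lookup (exact for the dict convention);
-- 'or ""' is exact because values are strings and the only falsy string is "" itself.
def pvGetName : List (String × String) → String
  | [] => ""
  | (k, v) :: rest => if k == "Name" then v else pvGetName rest

def pvNorm (c : List (String × String)) : String :=
  PySem.Str.lower (PySem.Str.strip (pvGetName c))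

def best_match_by_name (candidates : List (List (String × String))) (name : String) : Option (List (String × String)) :=
  if candidates.isEmpty then none
  else
    let name_low := PySem.Str.lower (PySem.Str.strip name)
    let exact := candidates.filter (fun c => pvNorm c == name_low)
    match exact.head? with
    | some e => some e
    | none =>
      let starts := candidates.filter (fun c => PySem.Str.startswith (pvNorm c) name_low)
      match starts.head? with
      | some s => some s
      | none =>
        let contains := candidates.filter (fun c => PySem.Str.isIn name_low (pvNorm c))
        match contains.head? with
        | some t => some t
        | none => none

-- ===== PORT B =====
def bmLoop (name_low : String) :
    List (List (String × String)) → Option (List (String × String)) → Option (List (String × String)) → Option (List (String × String))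
  | [], first_starts, first_contains =>
    match first_starts with
    | some s => some s
    | none => first_contains
  | c :: rest, first_starts, first_contains =>
    let n := pvNorm c
    if n == name_low then some c
    else if PySem.Str.startswith n name_low && first_starts.isNone then
      bmLoop name_low rest (some c) first_contains
    else if PySem.Str.isIn name_low n && first_contains.isNone then
      bmLoop name_low rest first_starts (some c)
    else bmLoop name_low rest first_starts first_contains

def best_match_by_name_alt (candidates : List (List (String × String))) (name : String) : Option (List (String × String)) :=
  if candidates.isEmpty then none
  else bmLoop (PySem.Str.lower (PySem.Str.strip name)) candidates none none

-- ===== PRECONDITION & SPEC =====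
def Spec_best_match_by_name (candidates : List (List (String × String))) (name : String) (out : Option (List (String × String))) : Prop := out = best_match_by_name_alt candidates name
instance (candidates : List (List (String × String))) (name : String) (out : Option (List (String × String))) : Decidable (Spec_best_match_by_name candidates name out) := by unfold Spec_best_match_by_name; infer_instance

-- ===== CLAIM (what is proved, stated in full; the proofs are below) =====
def Claim_equal_best_match_by_name : Prop := ∀ (candidates : List (List (String × String))) (name : String), Dom_best_match_by_name candidates name → Spec_best_match_by_name candidates name (best_match_by_name candidates name)

-- ===== LEMMAS AND PROOFS =====

-- Loop invariant for B: the loop's result expressed via A's three filter passes.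
theorem bmLoop_inv (nl : String) (l : List (List (String × String)))
    (fs fc : Option (List (String × String))) :
    bmLoop nl l fs fc =
      match (l.filter (fun c => pvNorm c == nl)).head? with
      | some e => some e
      | none =>
        match fs with
        | some s => some s
        | none =>
          match (l.filter (fun c => PySem.Str.startswith (pvNorm c) nl)).head? with
          | some s => some s
          | none =>
            match fc with
            | some t => some t
            | none =>
              match (l.filter (fun c => PySem.Str.isIn nl (pvNorm c))).head? with
              | some t => some t
              | none => none := by
  induction l generalizing fs fc with
  | nil => cases fs <;> cases fc <;> rfl
  | cons c rest ih =>
    cases hE : (pvNorm c == nl) with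
    | true =>
      simp only [bmLoop, hE, if_true, List.filter_cons, List.head?_cons]
    | false =>
      cases hS : PySem.Str.startswith (pvNorm c) nl with
      | true =>
        cases fs with
        | none =>
          simp only [bmLoop, hE, hS, Bool.false_eq_true, if_false, Option.isNone_none,
            Bool.and_true, if_true, List.filter_cons, List.head?_cons]
          rw [ih]
        | some s =>
          -- fs is already set: the result is s (or an exact hit) whatever happens to fc
          cases hC : PySem.Str.isIn nl (pvNorm c) with
          | true =>
            cases fc with
            | none =>
              simp only [bmLoop, hE, hS, hC, Bool.false_eq_true, if_false, Option.isNone_some,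
                Bool.and_false, Option.isNone_none, Bool.and_true, if_true, List.filter_cons]
              rw [ih]
            | some t =>
              simp only [bmLoop, hE, hS, hC, Bool.false_eq_true, if_false, Option.isNone_some,
                Bool.and_false, List.filter_cons]
              rw [ih]
          | false =>
            simp only [bmLoop, hE, hS, hC, Bool.false_eq_true, if_false, Option.isNone_some,
              Bool.and_false, Bool.false_and, List.filter_cons]
            rw [ih]
      | false =>
        cases hC : PySem.Str.isIn nl (pvNorm c) with
        | true =>
          cases fc with
          | none =>
            simp only [bmLoop, hE, hS, hC, Bool.false_eq_true, if_false, Bool.false_and,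
              Option.isNone_none, Bool.and_true, if_true, List.filter_cons, List.head?_cons]
            rw [ih]
          | some t =>
            simp only [bmLoop, hE, hS, hC, Bool.false_eq_true, if_false, Bool.false_and,
              Option.isNone_some, Bool.and_false, List.filter_cons]
            rw [ih]
        | false =>
          simp only [bmLoop, hE, hS, hC, Bool.false_eq_true, if_false, Bool.false_and,
            List.filter_cons]
          rw [ih]

-- ===== VERDICT (by name: the statement is the Claim_ definition above) =====
theorem best_match_by_name_spec : Claim_equal_best_match_by_name := by
  intro candidates name _
  unfold Spec_best_match_by_name
  cases candidates with
  | nil => rfl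
  | cons c rest =>
    show best_match_by_name (c :: rest) name = best_match_by_name_alt (c :: rest) name
    rw [best_match_by_name, best_match_by_name_alt, bmLoop_inv]
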